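-- pv_equiv track=rewrite | github.com/tanuchaurasiya/Leetcode | Frequency Game - GFG/frequency-game.py | LargButMinFreq
-- ===== SOURCE A (Python) =====
-- from collections import defaultdict
--
-- def LargButMinFreq(arr,n):
--     #code here
--     minf=10**9
--     ele=-10**9
--     d=defaultdict(int)
--     for x in arr:
--         d[x]+=1
--     for x in arr:
--         if d[x]<=minf:
--             if d[x]<minf:
--                 minf=d[x]
--                 ele=x
--             else:
--                 if ele<x:
--                     ele=x
--     return ele
-- ===== SOURCE B (Python) =====
-- def LargButMinFreq(arr, n):
--     s = sorted(arr)
--     minf = 10**9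
--     ele = -10**9
--     i = 0
--     while i < len(s):
--         j = i + 1
--         while j < len(s) and s[j] == s[i]:
--             j += 1
--         k = j - i
--         if k < minf or (k == minf and ele < s[i]):
--             minf, ele = k, s[i]
--         i = j
--     return ele
-- ===== Notes on version B (the rewrite author's own statement) =====
-- stated objective: alternative
-- what changed: B drops the frequency dictionary entirely: it sorts the array and makes one scan over the sorted list, measuring each run of equal values (run length = frequency) and keeping the run with the smallest length, largest value on ties.
import Mathlib
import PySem

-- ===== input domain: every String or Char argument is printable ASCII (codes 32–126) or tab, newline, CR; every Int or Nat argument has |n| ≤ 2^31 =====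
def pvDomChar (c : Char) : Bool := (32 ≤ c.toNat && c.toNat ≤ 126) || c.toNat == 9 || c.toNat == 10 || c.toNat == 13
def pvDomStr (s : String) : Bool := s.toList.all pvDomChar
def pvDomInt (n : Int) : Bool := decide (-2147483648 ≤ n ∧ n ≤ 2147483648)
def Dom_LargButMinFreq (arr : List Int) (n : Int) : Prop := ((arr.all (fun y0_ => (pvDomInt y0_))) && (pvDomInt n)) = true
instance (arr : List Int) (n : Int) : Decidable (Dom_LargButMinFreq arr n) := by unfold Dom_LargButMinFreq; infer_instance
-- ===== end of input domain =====

-- B drops A's frequency dict entirely: it sorts the array and scans it once, measuring each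
-- run of equal values (run length = frequency) and keeping the best (alternative; same value).

-- ===== PORT A =====
def LargButMinFreq (arr : List Int) (n : Int) : Int :=
  let minf : Int := 10 ^ 9
  let ele : Int := -(10 ^ 9)
  let d : PySem.Dict Int Int := arr.foldl (fun d x => d.modify x 0 (· + 1)) PySem.Dict.empty
  let r : Int × Int := arr.foldl (fun s x =>
    if d.getD x 0 ≤ s.1 then
      if d.getD x 0 < s.1 then (d.getD x 0, x)
      else if s.2 < x then (s.1, x) else s
    else s) (minf, ele)
  r.2

-- ===== PORT B =====
-- the outer while loop of Source B: consume one run of equal values (the inner while =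
-- takeWhile/dropWhile on the tail), update (minf, ele), continue after the run
def pvRunScan (s : List Int) (minf ele : Int) : Int :=
  match s with
  | [] => ele
  | x :: rest =>
      let k : Int := 1 + (rest.takeWhile (fun y => y == x)).length
      if k < minf ∨ (k = minf ∧ ele < x) then
        pvRunScan (rest.dropWhile (fun y => y == x)) k x
      else
        pvRunScan (rest.dropWhile (fun y => y == x)) minf ele
termination_by s.length
decreasing_by
  all_goals
    simpa using Nat.lt_succ_of_le (List.length_dropWhile_le (fun y => y == x) rest)

def LargButMinFreq_alt (arr : List Int) (n : Int) : Int :=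
  pvRunScan (PySem.List.sorted arr (fun x => x) false) (10 ^ 9) (-(10 ^ 9))

-- ===== PRECONDITION & SPEC =====
def Spec_LargButMinFreq (arr : List Int) (n : Int) (out : Int) : Prop := out = LargButMinFreq_alt arr n
instance (arr : List Int) (n : Int) (out : Int) : Decidable (Spec_LargButMinFreq arr n out) := by unfold Spec_LargButMinFreq; infer_instance

-- ===== CLAIM (what is proved, stated in full; the proofs are below) =====
def Claim_equal_LargButMinFreq : Prop := ∀ (arr : List Int) (n : Int), Dom_LargButMinFreq arr n → Spec_LargButMinFreq arr n (LargButMinFreq arr n)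

-- ===== LEMMAS AND PROOFS =====

-- the abstract update step both programs compute, frequency function c abstracted out
def pvStep (c : Int → Int) (s : Int × Int) (x : Int) : Int × Int :=
  if c x < s.1 ∨ (c x = s.1 ∧ s.2 < x) then (c x, x) else s

-- A's nested-if step is pvStep
theorem pvStepA_eq (c : Int → Int) :
    (fun (s : Int × Int) x =>
      if c x ≤ s.1 then
        if c x < s.1 then (c x, x)
        else if s.2 < x then (s.1, x) else s
      else s) = pvStep c := by
  funext s x
  simp only [pvStep]
  split_ifs <;> try rfl
  all_goals (simp [Prod.ext_iff]; omega)

theorem pvStep_rcomm (c : Int → Int) (s : Int × Int) (x y : Int) :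
    pvStep c (pvStep c s x) y = pvStep c (pvStep c s y) x := by
  simp only [pvStep]
  split_ifs <;> try rfl
  all_goals (simp_all [Prod.ext_iff]; omega)

-- A's fold over arr equals the fold over arr's distinct elements, plus the running invariant
theorem pvFold_dedup (c : Int → Int) (l : List Int) :
    l.foldl (pvStep c) (10 ^ 9, -(10 ^ 9)) = (PySem.Set.ofList l).foldl (pvStep c) (10 ^ 9, -(10 ^ 9)) ∧
    ∀ x ∈ l, (l.foldl (pvStep c) (10 ^ 9, -(10 ^ 9))).1 < c x ∨
      (c x = (l.foldl (pvStep c) (10 ^ 9, -(10 ^ 9))).1 ∧ x ≤ (l.foldl (pvStep c) (10 ^ 9, -(10 ^ 9))).2) := by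
  induction l using List.reverseRecOn with
  | nil => simp
  | append_singleton l x ih =>
    obtain ⟨ihEq, ihInv⟩ := ih
    rw [List.foldl_append, PySem.Set.ofList_append_singleton]
    set r := l.foldl (pvStep c) (10 ^ 9, -(10 ^ 9)) with hr
    simp only [List.foldl_cons, List.foldl_nil]
    by_cases hx : x ∈ l
    · have hmem : x ∈ PySem.Set.ofList l := (PySem.Set.mem_ofList l x).2 hx
      rw [PySem.Set.add_of_mem hmem, ← ihEq]
      have hfix : pvStep c r x = r := by
        have h2 := ihInv x hx
        simp only [pvStep]
        split_ifs with h
        · exfalso; rcases h with h | ⟨h, h'⟩ <;> rcases h2 with h2 | ⟨h2, h2'⟩ <;> omega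
        · rfl
      rw [hfix]
      refine ⟨rfl, ?_⟩
      intro y hy
      rcases List.mem_append.1 hy with hy | hy
      · exact ihInv y hy
      · rw [List.mem_singleton] at hy; subst hy; exact ihInv _ hx
    · have hmem : x ∉ PySem.Set.ofList l := fun h => hx ((PySem.Set.mem_ofList l x).1 h)
      rw [PySem.Set.add_of_not_mem hmem, List.foldl_append, ← ihEq]
      simp only [List.foldl_cons, List.foldl_nil]
      refine ⟨by trivial, ?_⟩
      intro y hy
      rcases List.mem_append.1 hy with hy | hy
      · have h2 := ihInv y hy
        simp only [pvStep]
        split_ifs with h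
        · rcases h with h | ⟨h, h'⟩ <;> rcases h2 with h2 | ⟨h2, h2'⟩ <;> simp <;> omega
        · exact h2
      · rw [List.mem_singleton] at hy; subst hy
        simp only [pvStep]
        split_ifs with h
        · simp
        · omega

-- the run heads of a list: first element of each maximal run of equal adjacent values
def pvRunHeads (s : List Int) : List Int :=
  match s with
  | [] => []
  | x :: rest => x :: pvRunHeads (rest.dropWhile (fun y => y == x))
termination_by s.length
decreasing_by
  all_goals
    simpa using Nat.lt_succ_of_le (List.length_dropWhile_le (fun y => y == x) rest)

theorem pvRunHeads_subset (s : List Int) : ∀ y ∈ pvRunHeads s, y ∈ s := by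
  induction s using pvRunHeads.induct with
  | case1 => simp [pvRunHeads]
  | case2 x rest ih =>
    intro y hy
    rw [pvRunHeads] at hy
    rcases List.mem_cons.1 hy with h | h
    · simp [h]
    · exact List.mem_cons_of_mem _ ((rest.dropWhile_sublist (p := fun y => y == x)).mem (ih y h))

-- on a sorted list, the tail after dropping the leading run contains no copy of the head
theorem pv_dropWhile_not_mem (x : Int) (rest : List Int)
    (hs : rest.Pairwise (fun a b => a ≤ b)) (hx : ∀ y ∈ rest, x ≤ y) :
    x ∉ rest.dropWhile (fun y => y == x) := by
  intro hmem
  have hsub := rest.dropWhile_sublist (p := fun y => y == x)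
  cases hd : rest.dropWhile (fun y => y == x) with
  | nil => simp [hd] at hmem
  | cons z t =>
    have hzne : ¬ (z == x) = true := by
      have := List.head_dropWhile_not (p := fun y => y == x) (l := rest) (by simp [hd])
      simpa [hd] using this
    have hzx : x ≤ z := hx z ((hd ▸ hsub).mem (by simp))
    have hzlt : x < z := lt_of_le_of_ne hzx (fun h => hzne (by simp [← h]))
    have hpd : (z :: t).Pairwise (fun a b => a ≤ b) := hd ▸ hs.sublist hsub
    rw [hd] at hmem
    rcases List.mem_cons.1 hmem with h | h
    · omega
    · have := (List.pairwise_cons.1 hpd).1 x h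
      omega

-- sortedness is inherited by the dropped tail
theorem pv_dropWhile_pairwise (x : Int) (rest : List Int)
    (hs : rest.Pairwise (fun a b => a ≤ b)) :
    (rest.dropWhile (fun y => y == x)).Pairwise (fun a b => a ≤ b) :=
  hs.sublist (List.dropWhile_sublist _)

-- membership: every element of a sorted list appears among its run heads, and they are distinct
theorem pvRunHeads_sorted (s : List Int) (hs : s.Pairwise (fun a b => a ≤ b)) :
    (∀ y ∈ s, y ∈ pvRunHeads s) ∧ (pvRunHeads s).Nodup := by
  induction s using pvRunHeads.induct with
  | case1 => simp [pvRunHeads]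
  | case2 x rest ih =>
    have hx : ∀ y ∈ rest, x ≤ y := (List.pairwise_cons.1 hs).1
    have hrest : rest.Pairwise (fun a b => a ≤ b) := (List.pairwise_cons.1 hs).2
    obtain ⟨ihMem, ihNd⟩ := ih (pv_dropWhile_pairwise x rest hrest)
    rw [pvRunHeads]
    constructor
    · intro y hy
      rcases List.mem_cons.1 hy with h | h
      · simp [h]
      · have h2 : y ∈ rest.takeWhile (fun y => y == x) ++ rest.dropWhile (fun y => y == x) := by
          rw [List.takeWhile_append_dropWhile]; exact h
        rcases List.mem_append.1 h2 with h' | h'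
        · have : (y == x) = true := List.mem_takeWhile_imp (p := fun y => y == x) h'
          simp_all
        · exact List.mem_cons_of_mem _ (ihMem y h')
    · refine List.nodup_cons.2 ⟨?_, ihNd⟩
      intro hmem
      exact pv_dropWhile_not_mem x rest hrest hx
        (pvRunHeads_subset _ x hmem)

-- the leading run length of a sorted list is the head's multiplicity
theorem pv_run_count (x : Int) (rest : List Int)
    (hs : rest.Pairwise (fun a b => a ≤ b)) (hx : ∀ y ∈ rest, x ≤ y) :
    ((1 : Int) + (rest.takeWhile (fun y => y == x)).length) = ((x :: rest).count x : Int) := by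
  have hsplit := List.takeWhile_append_dropWhile (p := fun y => y == x) (l := rest)
  have hcount : rest.count x
      = (rest.takeWhile (fun y => y == x)).count x + (rest.dropWhile (fun y => y == x)).count x := by
    conv_lhs => rw [← hsplit]
    exact List.count_append ..
  have htake : (rest.takeWhile (fun y => y == x)).count x
      = (rest.takeWhile (fun y => y == x)).length := by
    apply List.count_eq_length.2
    intro y hy
    exact (eq_of_beq (List.mem_takeWhile_imp (p := fun y => y == x) hy)).symm
  have hdrop : (rest.dropWhile (fun y => y == x)).count x = 0 :=
    List.count_eq_zero.2 (pv_dropWhile_not_mem x rest hs hx)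
  have : (x :: rest).count x = rest.count x + 1 := by simp
  omega

-- counts are untouched by removing a run of a different value
theorem pv_count_tail (x y : Int) (rest : List Int) (hne : y ≠ x) :
    ((x :: rest).count y : Int) = ((rest.dropWhile (fun z => z == x)).count y : Int) := by
  have hsplit := List.takeWhile_append_dropWhile (p := fun z => z == x) (l := rest)
  have hcount : rest.count y
      = (rest.takeWhile (fun z => z == x)).count y + (rest.dropWhile (fun z => z == x)).count y := by
    conv_lhs => rw [← hsplit]
    exact List.count_append ..
  have htake : (rest.takeWhile (fun z => z == x)).count y = 0 := by
    apply List.count_eq_zero.2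
    intro hmem
    exact hne (by simpa using List.mem_takeWhile_imp (p := fun z => z == x) hmem)
  have : (x :: rest).count y = rest.count y := by simp [Ne.symm hne]
  omega

-- B's run scan is the pvStep fold over the run heads, frequencies read off the list itself
theorem pvRunScan_eq_fold (s : List Int) (hs : s.Pairwise (fun a b => a ≤ b)) (a b : Int) :
    pvRunScan s a b = ((pvRunHeads s).foldl (pvStep (fun y => (s.count y : Int))) (a, b)).2 := by
  induction s using pvRunHeads.induct generalizing a b with
  | case1 => simp [pvRunScan, pvRunHeads]
  | case2 x rest ih =>
    have hx : ∀ y ∈ rest, x ≤ y := (List.pairwise_cons.1 hs).1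
    have hrest : rest.Pairwise (fun a b => a ≤ b) := (List.pairwise_cons.1 hs).2
    have hdp := pv_dropWhile_pairwise x rest hrest
    have hk := pv_run_count x rest hrest hx
    have hcongr : ∀ (init : Int × Int),
        (pvRunHeads (rest.dropWhile (fun y => y == x))).foldl
          (pvStep (fun y => (((x :: rest)).count y : Int))) init
        = (pvRunHeads (rest.dropWhile (fun y => y == x))).foldl
          (pvStep (fun y => ((rest.dropWhile (fun z => z == x)).count y : Int))) init := by
      intro init
      apply PySem.List.foldl_congr_mem
      intro acc y hy
      have hyd : y ∈ rest.dropWhile (fun z => z == x) := pvRunHeads_subset _ y hy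
      have hyne : y ≠ x := by
        intro h; exact pv_dropWhile_not_mem x rest hrest hx (h ▸ hyd)
      simp only [pvStep, pv_count_tail x y rest hyne]
    have hstep : pvStep (fun y => (((x :: rest)).count y : Int)) (a, b) x
        = if ((1 : Int) + (rest.takeWhile (fun y => y == x)).length) < a
            ∨ (((1 : Int) + (rest.takeWhile (fun y => y == x)).length) = a ∧ b < x)
          then (((1 : Int) + (rest.takeWhile (fun y => y == x)).length), x) else (a, b) := by
      simp only [pvStep, hk]
    simp only [pvRunScan, pvRunHeads, List.foldl_cons, hstep]
    split_ifs with h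
    · rw [hcongr]; exact ih hdp _ _
    · rw [hcongr]; exact ih hdp _ _

-- ===== VERDICT (by name: the statement is the Claim_ definition above) =====
theorem LargButMinFreq_spec : Claim_equal_LargButMinFreq := by
  intro arr n _
  simp only [Spec_LargButMinFreq, LargButMinFreq, LargButMinFreq_alt]
  set c : Int → Int := fun x => (arr.count x : Int) with hc
  -- A's side: fold of pvStep over arr, then over the distinct elements
  rw [← PySem.Dict.counter_eq_foldl]
  have hA : (fun (s : Int × Int) x =>
      if (PySem.Dict.counter arr).getD x 0 ≤ s.1 then
        if (PySem.Dict.counter arr).getD x 0 < s.1 then ((PySem.Dict.counter arr).getD x 0, x)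
        else if s.2 < x then (s.1, x) else s
      else s) = pvStep c := by
    rw [← pvStepA_eq]
    funext s x
    simp [PySem.Dict.getD_counter, hc]
  rw [hA]
  -- B's side: run scan of the sorted list = fold of pvStep over its run heads
  set s := PySem.List.sorted arr (fun x => x) false with hsdef
  have hperm : s.Perm arr := PySem.List.sorted_perm ..
  have hpw : s.Pairwise (fun a b => a ≤ b) := by
    simpa using PySem.List.sorted_pairwise (xs := arr) (key := fun x => x)
  have hcount : (fun y => (s.count y : Int)) = c := by
    funext y; simp [hc, hperm.count_eq]
  rw [pvRunScan_eq_fold s hpw, hcount]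
  -- the two folds run over permutations of each other's (distinct) index lists
  have hAperm := (pvFold_dedup c arr).1
  obtain ⟨hmem, hnd⟩ := pvRunHeads_sorted s hpw
  have hperm2 : (PySem.Set.ofList arr).Perm (pvRunHeads s) := by
    apply (List.perm_ext_iff_of_nodup (PySem.Set.nodup_ofList arr) hnd).2
    intro y
    constructor
    · intro hy
      exact hmem y (hperm.mem_iff.2 ((PySem.Set.mem_ofList arr y).1 hy))
    · intro hy
      exact (PySem.Set.mem_ofList arr y).2 (hperm.mem_iff.1 (pvRunHeads_subset s y hy))
  have := @List.Perm.foldl_eq _ _ (pvStep c) _ _ ⟨fun b x y => pvStep_rcomm c b x y⟩ hperm2 ((10 : Int) ^ 9, -(10 : Int) ^ 9)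
  rw [hAperm, this]
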